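-- pv_equiv track=rewrite | github.com/noname2048/algo | programmers/64062/q3.py | solution
-- ===== SOURCE A (Python) =====
-- def solution(stones, k):
--     highest_able = min(stones)
--     lowest_unable = max(stones)
--
--     lo = highest_able
--     hi = lowest_unable
--     mi = (lo + hi + 1) // 2
--
--     def cond():
--         return lowest_unable - highest_able == 1
--
--     while not cond():
--         continus_zero = 0
--
--         for s in stones:
--             if s - (mi - 1) <= 0:
--                 continus_zero += 1
--             else:
--                 continus_zero = 0
--
--             if continus_zero >= k:
--                 lowest_unable = mi
--                 hi = mi - 1
--                 mi = (lo + hi + 1) // 2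
--                 break
--         else:
--             highest_able = mi
--             lo = mi + 1
--             mi = (lo + hi + 1) // 2
--
--     return highest_able
-- ===== SOURCE B (Python) =====
-- def solution(stones, k):
--     # The answer is the minimum over all window start positions of the
--     # maximum stone in the window of k consecutive stones starting there
--     # (each window is a bottleneck); there are at most n start positions.
--     n = len(stones)
--     best = None
--     for i in range(min(n, n - k + 1)):
--         m = stones[i]
--         for j in range(i + 1, i + k):
--             if stones[j] > m:
--                 m = stones[j]
--         if best is None or m < best:
--             best = m
--     return best
-- ===== Notes on version B (the rewrite author's own statement) =====
-- stated objective: simpler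
-- what changed: A binary-searches the answer value, rescanning all stones per probe; B computes the answer directly as the minimum over window start positions of the window maximum, one nested scan, no search.
-- intended difference: On inputs where every k consecutive stones contain the global maximum M (so the true answer is M) and d = M - min(stones) is 1 or satisfies 2^j <= d+2 < 1.5*2^j, A's bisection closes its bracket without ever probing M and returns M-1, while B returns the intended value M. — e.g. on solution([1, 3], 2): A returns 2, B returns 3
-- outside the precondition, e.g. on solution([1, 3], 3): A returns 2, B returns None; on solution([5, 5], 0): A does not finish within the time limit, B returns 5; on solution([], 1): A raises ValueError, B returns None
import Mathlib
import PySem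

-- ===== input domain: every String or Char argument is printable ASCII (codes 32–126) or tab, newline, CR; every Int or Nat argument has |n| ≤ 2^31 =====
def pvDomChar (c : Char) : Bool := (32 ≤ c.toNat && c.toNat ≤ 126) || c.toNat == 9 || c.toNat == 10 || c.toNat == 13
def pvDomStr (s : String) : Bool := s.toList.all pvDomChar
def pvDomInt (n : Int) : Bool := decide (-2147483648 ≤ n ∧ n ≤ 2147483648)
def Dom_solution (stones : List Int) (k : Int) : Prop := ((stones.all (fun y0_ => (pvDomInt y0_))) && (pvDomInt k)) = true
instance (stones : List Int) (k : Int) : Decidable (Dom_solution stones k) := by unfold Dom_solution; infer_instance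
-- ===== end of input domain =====

-- B replaces A's binary search over the answer value (each probe rescanning all stones) by the
-- direct computation: the answer is the minimum over all windows of k consecutive stones of the
-- window maximum — one nested scan, no search (objective: simpler; not claimed faster).

-- ===== PORT A =====
-- inner 'for s in stones' loop: returns true iff the loop hit 'break' (k consecutive exhausted stones)
def pvRunScan (k m : Int) : List Int → Int → Bool
  | [], _ => false
  | s :: rest, cz =>
    let cz' := if s - m ≤ 0 then cz + 1 else 0
    if cz' ≥ k then true else pvRunScan k m rest cz'

-- the 'while not cond()' loop; fuel only makes the recursion total (A diverges outside Pre_solution)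
def pvLoopA (stones : List Int) (k : Int) : Nat → Int → Int → Int → Int → Int → Int
  | 0, ha, _, _, _, _ => ha
  | fuel + 1, ha, lu, lo, hi, mi =>
    if lu - ha = 1 then ha
    else
      if pvRunScan k (mi - 1) stones 0 then
        pvLoopA stones k fuel ha mi lo (mi - 1) (PySem.Int.floordiv (lo + (mi - 1) + 1) 2)
      else
        pvLoopA stones k fuel mi lu (mi + 1) hi (PySem.Int.floordiv ((mi + 1) + hi + 1) 2)

def solution (stones : List Int) (k : Int) : Int :=
  let ha := (PySem.List.min? stones (fun x => x)).getD 0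
  let lu := (PySem.List.max? stones (fun x => x)).getD 0
  let mi := PySem.Int.floordiv (ha + lu + 1) 2
  pvLoopA stones k ((lu - ha).toNat + 4) ha lu ha lu mi

-- ===== PORT B =====
def solution_alt (stones : List Int) (k : Int) : Int :=
  (((PySem.List.pyRange 0 (min (stones.length : Int) ((stones.length : Int) - k + 1)) 1)).foldl
    (fun (best : Option Int) i =>
      let m := (PySem.List.pyRange (i + 1) (i + k) 1).foldl
        (fun m j => if PySem.List.pyGetD stones j 0 > m then PySem.List.pyGetD stones j 0 else m)
        (PySem.List.pyGetD stones i 0)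
      match best with
      | none => some m
      | some b => if m < b then some m else some b) none).getD 0

-- ===== PRECONDITION & SPEC =====
-- Pre_ excludes exactly: empty stones (A raises ValueError on min([])); k > len(stones)
-- (A returns an accidental value there while B returns None, not an int); and k ≤ 0 with all
-- stones equal (A's bisection never closes its bracket and diverges, while B returns the stone).
def Pre_solution (stones : List Int) (k : Int) : Prop :=
  stones ≠ [] ∧ k ≤ stones.length ∧ (1 ≤ k ∨ stones.max?.getD 0 ≠ stones.min?.getD 0)

instance (stones : List Int) (k : Int) : Decidable (Pre_solution stones k) := by
  unfold Pre_solution; infer_instance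

def pvWitness_solution : List Int × Int := ([1, 2, 3], 2)

-- On inputs where every k consecutive stones contain the global maximum M (so the intended
-- answer is M) and d = M - min(stones) is 1 or satisfies 2^j ≤ d+2 < 1.5·2^j, A's bisection
-- closes its bracket without ever probing M and returns M - 1; B returns the intended value M.
def D_solution (stones : List Int) (k : Int) : Prop :=
  let d := stones.max?.getD 0 - stones.min?.getD 0
  (∀ i < stones.length + 1 - k.toNat,
      stones.max?.getD 0 ∈ (stones.drop i).take k.toNat) ∧
  (d = 1 ∨ 2 ≤ d ∧ 2 * (d + 2).toNat < 3 * 2 ^ (d + 2).toNat.log2)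

instance (stones : List Int) (k : Int) : Decidable (D_solution stones k) := by
  unfold D_solution; infer_instance

def Spec_solution (stones : List Int) (k : Int) (out : Int) : Prop :=
  ¬ D_solution stones k → out = solution_alt stones k
instance (stones : List Int) (k : Int) (out : Int) : Decidable (Spec_solution stones k out) := by
  unfold Spec_solution; infer_instance

def pvDiffWitness_solution : List Int × Int := ([1, 3], 2)
def pvDiffWitnessOut_solution : Int × Int := (2, 3)

-- ===== CLAIM (what is proved, stated in full; the proofs are below) =====
def Claim_unchanged_solution : Prop := ∀ (stones : List Int) (k : Int), Dom_solution stones k → Pre_solution stones k → Spec_solution stones k (solution stones k)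
def Claim_changed_solution : Prop := Dom_solution (pvDiffWitness_solution.1) (pvDiffWitness_solution.2) ∧ Pre_solution (pvDiffWitness_solution.1) (pvDiffWitness_solution.2) ∧ D_solution (pvDiffWitness_solution.1) (pvDiffWitness_solution.2) ∧ solution (pvDiffWitness_solution.1) (pvDiffWitness_solution.2) = pvDiffWitnessOut_solution.1 ∧ solution_alt (pvDiffWitness_solution.1) (pvDiffWitness_solution.2) = pvDiffWitnessOut_solution.2 ∧ pvDiffWitnessOut_solution.1 ≠ pvDiffWitnessOut_solution.2
def Claim_exact_solution : Prop := ∀ (stones : List Int) (k : Int), Dom_solution stones k → Pre_solution stones k → D_solution stones k → solution stones k ≠ solution_alt stones k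

-- ===== LEMMAS AND PROOFS =====

-- max/min of a nonempty list, as the Python 'max(xs)'/'min(xs)' loop computes them
def lmax : List Int → Int
  | [] => 0
  | h :: t => t.foldl max h

def lmin : List Int → Int
  | [] => 0
  | h :: t => t.foldl min h

-- max of the window of length K starting at i
def wmax (stones : List Int) (K i : Nat) : Int := lmax ((stones.drop i).take K)

-- the value B computes: min over all windows of the window max
def ansSpec (stones : List Int) (K : Nat) : Int :=
  lmin ((List.range (stones.length + 1 - K)).map (wmax stones K))

-- length of the all-≤-m prefix, and of the longest all-≤-m run
def pref (m : Int) : List Int → Nat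
  | [] => 0
  | s :: t => if s ≤ m then pref m t + 1 else 0
def mrun (m : Int) : List Int → Nat
  | [] => 0
  | s :: t => max (if s ≤ m then pref m t + 1 else 0) (mrun m t)

-- the divergence pattern of A's floor-midpoint climb when the true answer is the maximum
def badd : Nat → Bool
  | 0 => true
  | 1 => false
  | (x + 2) => badd ((x + 2) / 2 - 1)
  decreasing_by omega

-- ---- basic lmax / lmin facts ----
lemma lmax_mem (l : List Int) (hl : l ≠ []) : lmax l ∈ l := by
  cases l with
  | nil => exact absurd rfl hl
  | cons h t =>
    show t.foldl max h ∈ h :: t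
    rcases PySem.List.foldl_max_mem t h with h1 | h1
    · rw [h1]; exact List.mem_cons_self
    · exact List.mem_cons_of_mem _ h1

lemma le_lmax (l : List Int) (x : Int) (hx : x ∈ l) : x ≤ lmax l := by
  cases l with
  | nil => simp at hx
  | cons h t =>
    show x ≤ t.foldl max h
    rcases List.mem_cons.1 hx with rfl | h1
    · exact (PySem.List.le_foldl_max t x).1
    · exact (PySem.List.le_foldl_max t h).2 x h1

lemma lmax_le_iff (l : List Int) (m : Int) (hl : l ≠ []) :
    lmax l ≤ m ↔ ∀ x ∈ l, x ≤ m := by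
  constructor
  · intro h x hx; exact le_trans (le_lmax l x hx) h
  · intro h; exact h _ (lmax_mem l hl)

lemma lmin_mem (l : List Int) (hl : l ≠ []) : lmin l ∈ l := by
  cases l with
  | nil => exact absurd rfl hl
  | cons h t =>
    show t.foldl min h ∈ h :: t
    rcases PySem.List.foldl_min_mem t h with h1 | h1
    · rw [h1]; exact List.mem_cons_self
    · exact List.mem_cons_of_mem _ h1

lemma lmin_le (l : List Int) (x : Int) (hx : x ∈ l) : lmin l ≤ x := by
  cases l with
  | nil => simp at hx
  | cons h t =>
    show t.foldl min h ≤ x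
    rcases List.mem_cons.1 hx with rfl | h1
    · exact (PySem.List.foldl_min_le t x).1
    · exact (PySem.List.foldl_min_le t h).2 x h1

lemma lmin_le_iff (l : List Int) (m : Int) (hl : l ≠ []) :
    lmin l ≤ m ↔ ∃ x ∈ l, x ≤ m := by
  constructor
  · intro h; exact ⟨lmin l, lmin_mem l hl, h⟩
  · rintro ⟨x, hx, hxm⟩; exact le_trans (lmin_le l x hx) hxm

lemma le_lmin (l : List Int) (m : Int) (hl : l ≠ []) (h : ∀ x ∈ l, m ≤ x) : m ≤ lmin l :=
  h _ (lmin_mem l hl)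

-- ---- A-side: what the inner scan decides ----
lemma pref_iff (m : Int) : ∀ (l : List Int) (j : Nat),
    j ≤ pref m l ↔ j ≤ l.length ∧ ∀ x ∈ l.take j, x ≤ m := by
  intro l
  induction l with
  | nil => intro j; simp [pref]
  | cons s t ih =>
    intro j
    cases j with
    | zero => simp
    | succ j' =>
      by_cases hsm : s ≤ m
      · simp only [pref, if_pos hsm, List.take_succ_cons, List.length_cons, List.mem_cons]
        constructor
        · intro h
          have := (ih j').1 (by omega)
          refine ⟨by omega, ?_⟩
          rintro x (rfl | hx)
          · exact hsm
          · exact this.2 x hx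
        · rintro ⟨h1, h2⟩
          have := (ih j').2 ⟨by omega, fun x hx => h2 x (Or.inr hx)⟩
          omega
      · simp only [pref, if_neg hsm, List.take_succ_cons, List.length_cons, List.mem_cons]
        constructor
        · omega
        · rintro ⟨_, h2⟩
          exact absurd (h2 s (Or.inl rfl)) hsm

lemma mrun_cons (m s : Int) (t : List Int) :
    mrun m (s :: t) = max (pref m (s :: t)) (mrun m t) := by
  simp [mrun, pref]

lemma pref_le_mrun (m : Int) : ∀ l : List Int, pref m l ≤ mrun m l := by
  intro l
  cases l with
  | nil => exact le_refl 0
  | cons s t => rw [mrun_cons]; exact le_max_left _ _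

lemma mrun_iff (m : Int) (K : Nat) (hK : 1 ≤ K) : ∀ l : List Int,
    K ≤ mrun m l ↔ ∃ i : Nat, i + K ≤ l.length ∧ ∀ x ∈ (l.drop i).take K, x ≤ m := by
  intro l
  induction l with
  | nil =>
    simp only [mrun, List.length_nil, List.drop_nil, List.take_nil]
    constructor
    · omega
    · rintro ⟨i, hi, -⟩; omega
  | cons s t ih =>
    rw [mrun_cons, le_max_iff]
    constructor
    · rintro (h | h)
      · obtain ⟨h1, h2⟩ := (pref_iff m (s :: t) K).1 h
        exact ⟨0, by simpa using h1, by simpa using h2⟩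
      · obtain ⟨i, hi, hall⟩ := ih.1 h
        exact ⟨i + 1, by simpa using by omega, by simpa using hall⟩
    · rintro ⟨i, hi, hall⟩
      cases i with
      | zero =>
        left
        exact (pref_iff m (s :: t) K).2 ⟨by simpa using hi, fun x hx => hall x (by simpa using hx)⟩
      | succ i' =>
        right
        exact ih.2 ⟨i', by simp at hi ⊢; omega, by simpa using hall⟩

lemma runScan_eq (k m : Int) : ∀ (l : List Int) (cz : Int), 0 ≤ cz → cz < k →
    pvRunScan k m l cz = decide (k ≤ max (cz + (pref m l : Int)) ((mrun m l : Int))) := by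
  intro l
  induction l with
  | nil =>
    intro cz h0 h1
    simp only [pvRunScan, pref, mrun, Nat.cast_zero]
    rw [eq_comm, decide_eq_false_iff_not, le_max_iff]
    omega
  | cons s t ih =>
    intro cz h0 h1
    by_cases hsm : s - m ≤ 0
    · have hsm' : s ≤ m := by omega
      simp only [pvRunScan, if_pos hsm]
      by_cases hbig : cz + 1 ≥ k
      · rw [if_pos hbig, eq_comm, decide_eq_true_iff]
        rw [le_max_iff]
        left
        simp only [pref, if_pos hsm']
        push_cast
        omega
      · rw [if_neg hbig, ih (cz + 1) (by omega) (by omega), decide_eq_decide]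
        rw [le_max_iff, le_max_iff, mrun_cons]
        simp only [pref, if_pos hsm']
        push_cast
        rw [le_max_iff]
        omega
    · have hsm' : ¬ s ≤ m := by omega
      simp only [pvRunScan, if_neg hsm]
      rw [if_neg (by omega), ih 0 le_rfl (by omega), decide_eq_decide]
      have hpm := pref_le_mrun m t
      rw [le_max_iff, le_max_iff, mrun_cons]
      simp only [pref, if_neg hsm']
      have hpm' : (pref m t : Int) ≤ (mrun m t : Int) := by exact_mod_cast hpm
      push_cast
      rw [le_max_iff]
      omega

lemma runScan_mrun (k m : Int) (stones : List Int) (hk : 1 ≤ k) :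
    pvRunScan k m stones 0 = decide (k ≤ (mrun m stones : Int)) := by
  rw [runScan_eq k m stones 0 le_rfl (by omega), decide_eq_decide, le_max_iff]
  have := pref_le_mrun m stones
  constructor
  · rintro (h | h)
    · have : (pref m stones : Int) ≤ (mrun m stones : Int) := by exact_mod_cast this
      omega
    · exact h
  · intro h; right; exact h

-- ---- A-side: the scan answers "ansSpec ≤ v" ----
lemma window_ne_nil (stones : List Int) (K i : Nat) (hK : 1 ≤ K) (hi : i + K ≤ stones.length) :
    (stones.drop i).take K ≠ [] := by
  apply List.ne_nil_of_length_pos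
  simp [List.length_take, List.length_drop]
  omega

lemma ansList_ne_nil (stones : List Int) (K : Nat) (hKn : K ≤ stones.length) :
    (List.range (stones.length + 1 - K)).map (wmax stones K) ≠ [] := by
  apply List.ne_nil_of_length_pos
  simp
  omega

lemma ans_le_iff (stones : List Int) (K : Nat) (hK : 1 ≤ K) (hKn : K ≤ stones.length) (v : Int) :
    ansSpec stones K ≤ v ↔ K ≤ mrun v stones := by
  rw [ansSpec, lmin_le_iff _ _ (ansList_ne_nil stones K hKn), mrun_iff v K hK]
  constructor
  · rintro ⟨x, hx, hxv⟩
    obtain ⟨i, hi, rfl⟩ := List.mem_map.1 hx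
    have hi' : i + K ≤ stones.length := by have := List.mem_range.1 hi; omega
    refine ⟨i, hi', ?_⟩
    exact (lmax_le_iff _ v (window_ne_nil stones K i hK hi')).1 hxv
  · rintro ⟨i, hi, hall⟩
    refine ⟨wmax stones K i, List.mem_map.2 ⟨i, List.mem_range.2 (by omega), rfl⟩, ?_⟩
    exact (lmax_le_iff _ v (window_ne_nil stones K i hK hi)).2 hall

lemma runScan_ans (stones : List Int) (k : Int) (K : Nat) (hk : k = (K : Int))
    (hK : 1 ≤ K) (hKn : K ≤ stones.length) (v : Int) :
    pvRunScan k v stones 0 = decide (ansSpec stones K ≤ v) := by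
  rw [runScan_mrun k v stones (by omega), decide_eq_decide, ans_le_iff stones K hK hKn v, hk]
  exact_mod_cast Iff.rfl

lemma ans_mem (stones : List Int) (K : Nat) (hK : 1 ≤ K) (hKn : K ≤ stones.length) :
    ansSpec stones K ∈ stones := by
  have h1 := lmin_mem _ (ansList_ne_nil stones K hKn)
  rw [ansSpec]
  obtain ⟨i, hi, heq⟩ := List.mem_map.1 h1
  have hi' : i + K ≤ stones.length := by have := List.mem_range.1 hi; omega
  rw [← heq]
  have h2 := lmax_mem _ (window_ne_nil stones K i hK hi')
  exact List.mem_of_mem_drop (List.mem_of_mem_take h2)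

-- ---- A-side: the bisection loop ----
lemma badd_two (y : Nat) (hy : 2 ≤ y) : badd y = badd (y / 2 - 1) := by
  rcases y with _ | _ | x
  · omega
  · omega
  · conv_lhs => rw [badd]

lemma ML1 (stones : List Int) (k : Int) (K : Nat) (hk : k = (K : Int))
    (hK1 : 1 ≤ K) (hKn : K ≤ stones.length)
    (A : Int) (hA : A = ansSpec stones K) :
    ∀ (fuel : Nat) (ha lu lo hi : Int),
      ha ≤ A → lo ≤ A + 1 → A ≤ hi →
      (lo = ha + 1 ∨ lo = ha) →
      ((lu = hi + 1 ∧ A < lu) ∨ (lu = hi ∧ A < lu)) →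
      (hi - lo).toNat + 2 ≤ fuel →
      pvLoopA stones k fuel ha lu lo hi (PySem.Int.floordiv (lo + hi + 1) 2) = A := by
  intro fuel
  induction fuel with
  | zero => intro ha lu lo hi _ _ _ _ _ hf; exact absurd hf (by omega)
  | succ f ih =>
    intro ha lu lo hi h1 h2 h3 h4 h5 hf
    rw [pvLoopA]
    by_cases hexit : lu - ha = 1
    · rw [if_pos hexit]; rcases h4 with h4 | h4 <;> rcases h5 with ⟨h5a, h5b⟩ | ⟨h5a, h5b⟩ <;> omega
    rw [if_neg hexit]
    have hlohi : lo ≤ hi := by rcases h4 with h4 | h4 <;> rcases h5 with ⟨h5a, h5b⟩ | ⟨h5a, h5b⟩ <;> omega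
    rw [PySem.Int.floordiv_eq_ediv_of_pos (by norm_num)]
    have hmb : lo ≤ (lo + hi + 1) / 2 ∧ (lo + hi + 1) / 2 ≤ hi := by omega
    rw [runScan_ans stones k K hk hK1 hKn, ← hA]
    by_cases hun : A ≤ (lo + hi + 1) / 2 - 1
    · rw [decide_eq_true hun, if_pos rfl]
      by_cases hterm : lo ≤ (lo + hi + 1) / 2 - 1
      · have hfb : (((lo + hi + 1) / 2 - 1) - lo).toNat + 2 ≤ f := by omega
        exact ih ha ((lo + hi + 1) / 2) lo ((lo + hi + 1) / 2 - 1)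
          h1 h2 (by omega) h4 (Or.inl ⟨by omega, by omega⟩) hfb
      · -- mid = lo: the recursive state exits at once
        have hmi0 : (lo + hi + 1) / 2 = lo := by omega
        have hlo1 : lo = ha + 1 := by rcases h4 with h4 | h4 <;> omega
        rcases f with _ | f'
        · omega
        · rw [pvLoopA, if_pos (by omega)]
          omega
    · rw [decide_eq_false hun, if_neg (by simp)]
      by_cases hterm : (lo + hi + 1) / 2 + 1 ≤ hi
      · have hfb : (hi - ((lo + hi + 1) / 2 + 1)).toNat + 2 ≤ f := by omega
        exact ih ((lo + hi + 1) / 2) lu ((lo + hi + 1) / 2 + 1) hi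
          (by omega) (by omega) h3 (Or.inl rfl) h5 hfb
      · -- mid = hi: the recursive state exits at once
        have hmi0 : (lo + hi + 1) / 2 = hi := by omega
        have hlu1 : lu = hi + 1 := by
          rcases h5 with ⟨h5a, h5b⟩ | ⟨h5a, h5b⟩ <;> omega
        rcases f with _ | f'
        · omega
        · rw [pvLoopA, if_pos (by omega)]
          omega

lemma ML2 (stones : List Int) (k : Int) (K : Nat) (hk : k = (K : Int))
    (hK1 : 1 ≤ K) (hKn : K ≤ stones.length)
    (A M : Int) (hA : A = ansSpec stones K) (hAM : A = M) :
    ∀ (fuel : Nat) (lo : Int), lo ≤ M + 1 →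
      (M - lo).toNat + 3 ≤ fuel →
      pvLoopA stones k fuel (lo - 1) M lo M (PySem.Int.floordiv (lo + M + 1) 2) =
        (if lo ≤ M ∧ badd (M - lo).toNat = true then M - 1 else M) := by
  intro fuel
  induction fuel with
  | zero => intro lo _ hf; exact absurd hf (by omega)
  | succ f ih =>
    intro lo hlo hf
    rw [pvLoopA]
    by_cases hexit : M - (lo - 1) = 1
    · rw [if_pos hexit]
      have hlom : lo = M := by omega
      have h0 : (M - lo).toNat = 0 := by omega
      rw [if_pos ⟨by omega, by rw [h0]; simp [badd]⟩]
      omega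
    rw [if_neg hexit]
    rw [PySem.Int.floordiv_eq_ediv_of_pos (by norm_num)]
    rw [runScan_ans stones k K hk hK1 hKn, ← hA]
    by_cases hcase : lo = M + 1
    · have hmi : (lo + M + 1) / 2 = M + 1 := by omega
      rw [decide_eq_true (by omega : A ≤ (lo + M + 1) / 2 - 1), if_pos rfl]
      rcases f with _ | f'
      · omega
      · rw [pvLoopA, if_pos (by omega : (lo + M + 1) / 2 - (lo - 1) = 1)]
        rw [if_neg (by omega)]
        omega
    · have hloM : lo ≤ M - 1 := by omega
      have hmb : lo + 1 ≤ (lo + M + 1) / 2 ∧ (lo + M + 1) / 2 ≤ M := by omega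
      rw [decide_eq_false (by omega : ¬ A ≤ (lo + M + 1) / 2 - 1), if_neg (by simp)]
      have hrec := ih ((lo + M + 1) / 2 + 1) (by omega) (by omega)
      rw [show (lo + M + 1) / 2 + 1 - 1 = (lo + M + 1) / 2 from by omega] at hrec
      rw [hrec]
      by_cases h1 : lo = M - 1
      · have hmiM : (lo + M + 1) / 2 = M := by omega
        rw [if_neg (by omega)]
        have hb : (M - lo).toNat = 1 := by omega
        rw [if_neg]
        rintro ⟨-, hbd⟩
        rw [hb] at hbd
        simp [badd] at hbd
      · have hx2 : 2 ≤ (M - lo).toNat := by omega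
        have hrel : (M - ((lo + M + 1) / 2 + 1)).toNat = (M - lo).toNat / 2 - 1 := by omega
        have hbb : badd (M - ((lo + M + 1) / 2 + 1)).toNat = badd (M - lo).toNat := by
          rw [hrel, ← badd_two _ hx2]
        rw [hbb]
        have hc1 : (lo + M + 1) / 2 + 1 ≤ M := by omega
        by_cases hbd : badd (M - lo).toNat = true
        · rw [if_pos ⟨hc1, hbd⟩, if_pos ⟨by omega, hbd⟩]
        · rw [if_neg (by rintro ⟨-, h⟩; exact hbd h), if_neg (by rintro ⟨-, h⟩; exact hbd h)]

-- ---- identifying the pieces of the two ports ----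
lemma py_maxD_eq (h : Int) (t : List Int) :
    (PySem.List.max? (h :: t) (fun x => x)).getD 0 = lmax (h :: t) := by
  rw [PySem.List.max?_id_cons]; rfl
lemma py_minD_eq (h : Int) (t : List Int) :
    (PySem.List.min? (h :: t) (fun x => x)).getD 0 = lmin (h :: t) := by
  rw [PySem.List.min?_id_cons]; rfl

lemma solution_eq_loop (stones : List Int) (k : Int) (hne : stones ≠ []) :
    solution stones k =
      pvLoopA stones k ((lmax stones - lmin stones).toNat + 4) (lmin stones) (lmax stones)
        (lmin stones) (lmax stones)
        (PySem.Int.floordiv (lmin stones + lmax stones + 1) 2) := by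
  cases stones with
  | nil => exact absurd rfl hne
  | cons h t =>
    show pvLoopA _ _ _ _ _ _ _ _ = _
    rw [py_maxD_eq, py_minD_eq]

-- ---- B-side: the port computes ansSpec ----
lemma if_gt_eq_max (x y : Int) : (if y > x then y else x) = max x y := by
  by_cases h : x < y
  · simp [h, max_eq_right h.le]
  · simp [h, max_eq_left (not_lt.mp h)]

lemma if_lt_eq_min (x y : Int) : (if y < x then y else x) = min x y := by
  by_cases h : y < x
  · simp [h, min_eq_right h.le]
  · simp [h, min_eq_left (not_lt.mp h)]

lemma fold_gt_eq_fold_max (g : Int → Int) :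
    ∀ (js : List Int) (x : Int),
      js.foldl (fun m j => if g j > m then g j else m) x = (js.map g).foldl max x := by
  intro js
  induction js with
  | nil => intro x; rfl
  | cons j js ih =>
    intro x
    simp only [List.foldl_cons, List.map_cons]
    rw [if_gt_eq_max]
    exact ih _

lemma map_get_pyRange (stones : List Int) :
    ∀ (c a : Nat), a + c ≤ stones.length →
      (PySem.List.pyRange (a : Int) ((a : Int) + (c : Int)) 1).map
          (fun j => PySem.List.pyGetD stones j 0) = (stones.drop a).take c := by
  intro c
  induction c with
  | zero =>
    intro a _
    rw [show ((a : Int) + (0 : Nat) = (a : Int)) from by push_cast; ring]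
    rw [PySem.List.pyRange_one_eq_nil le_rfl]
    simp
  | succ c ih =>
    intro a ha
    rw [PySem.List.pyRange_one_cons (by push_cast; omega)]
    have hcast : ((a : Int) + 1) = ((a + 1 : Nat) : Int) := by push_cast; ring
    have hcast2 : ((a : Int) + ((c + 1 : Nat) : Int)) = ((a + 1 : Nat) : Int) + (c : Int) := by
      push_cast; ring
    rw [List.map_cons, hcast2, hcast, ih (a + 1) (by omega)]
    have halen : a < stones.length := by omega
    rw [List.drop_eq_getElem_cons halen, List.take_succ_cons]
    congr 1
    rw [PySem.List.pyGetD_natCast, List.getD_eq_getElem?_getD, List.getElem?_eq_getElem halen]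
    rfl

lemma optfold_min (vs : List Int) :
    ∀ b : Int,
      vs.foldl (fun (o : Option Int) v =>
        match o with
        | none => some v
        | some b => if v < b then some v else some b) (some b) = some (vs.foldl min b) := by
  induction vs with
  | nil => intro b; rfl
  | cons v vs ih =>
    intro b
    simp only [List.foldl_cons]
    have hh : (if v < b then some v else some b) = some (min b v) := by
      rw [← if_lt_eq_min]; split <;> rfl
    rw [hh]
    exact ih _

lemma optfold_min_none (v : Int) (vs : List Int) :
    (v :: vs).foldl (fun (o : Option Int) v =>
      match o with
      | none => some v
      | some b => if v < b then some v else some b) none = some (lmin (v :: vs)) := by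
  simp only [List.foldl_cons]
  exact optfold_min vs v

def pvInner (stones : List Int) (k : Int) (i : Int) : Int :=
  (PySem.List.pyRange (i + 1) (i + k) 1).foldl
    (fun m j => if PySem.List.pyGetD stones j 0 > m then PySem.List.pyGetD stones j 0 else m)
    (PySem.List.pyGetD stones i 0)

lemma optfold_factor (g : Nat → Int) :
    ∀ (is : List Nat) (o : Option Int),
      is.foldl (fun o i =>
        match o with
        | none => some (g i)
        | some b => if g i < b then some (g i) else some b) o =
      (is.map g).foldl (fun o v =>
        match o with
        | none => some v
        | some b => if v < b then some v else some b) o := by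
  intro is
  induction is with
  | nil => intro o; rfl
  | cons i is ih => intro o; simp only [List.foldl_cons, List.map_cons]; exact ih _

lemma inner_eq_wmax (stones : List Int) (k : Int) (K : Nat) (hk : k = (K : Int))
    (hK1 : 1 ≤ K) (i : Nat) (hik : i + K ≤ stones.length) :
    pvInner stones k (i : Int) = wmax stones K i := by
  unfold pvInner
  rw [fold_gt_eq_fold_max]
  have h1 : ((i : Int) + 1) = ((i + 1 : Nat) : Int) := by push_cast; ring
  have h2 : ((i : Int) + k) = ((i + 1 : Nat) : Int) + ((K - 1 : Nat) : Int) := by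
    subst hk; push_cast; omega
  rw [h1, h2, map_get_pyRange stones (K - 1) (i + 1) (by omega)]
  have hilen : i < stones.length := by omega
  have hget : PySem.List.pyGetD stones (i : Int) 0 = stones[i] := by
    rw [PySem.List.pyGetD_natCast, List.getD_eq_getElem?_getD,
      List.getElem?_eq_getElem hilen]; rfl
  rw [hget, wmax, List.drop_eq_getElem_cons hilen,
    show K = (K - 1) + 1 from by omega, List.take_succ_cons]
  rfl

lemma alt_eq_ansSpec (stones : List Int) (k : Int) (K : Nat) (hk : k = (K : Int))
    (hK1 : 1 ≤ K) (hKn : K ≤ stones.length) :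
    solution_alt stones k = ansSpec stones K := by
  unfold solution_alt
  rw [min_eq_right (by omega : (stones.length : Int) - k + 1 ≤ (stones.length : Int))]
  have hm : (stones.length : Int) - k + 1 = ((stones.length + 1 - K : Nat) : Int) := by
    subst hk; omega
  rw [hm, PySem.List.pyRange_zero_nat, List.foldl_map]
  show ((List.range (stones.length + 1 - K)).foldl
      (fun (o : Option Int) (i : Nat) =>
        match o with
        | none => some (pvInner stones k (i : Int))
        | some b => if pvInner stones k (i : Int) < b then some (pvInner stones k (i : Int))
                    else some b) none).getD 0 = ansSpec stones K
  rw [optfold_factor (fun i : Nat => pvInner stones k (i : Int))]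
  rw [List.map_congr_left (fun i hi => inner_eq_wmax stones k K hk hK1 i
      (by have := List.mem_range.1 hi; omega))]
  cases hv : (List.range (stones.length + 1 - K)).map (wmax stones K) with
  | nil => exact absurd hv (ansList_ne_nil stones K hKn)
  | cons v vs =>
    rw [optfold_min_none, ansSpec, hv]
    rfl

-- ---- the window formula of D_ says exactly "the answer is the maximum" ----
lemma ans_le_M (stones : List Int) (K : Nat) (hK1 : 1 ≤ K) (hKn : K ≤ stones.length) :
    ansSpec stones K ≤ lmax stones :=
  le_lmax stones _ (ans_mem stones K hK1 hKn)

lemma m0_le_ans (stones : List Int) (K : Nat) (hK1 : 1 ≤ K) (hKn : K ≤ stones.length) :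
    lmin stones ≤ ansSpec stones K :=
  lmin_le stones _ (ans_mem stones K hK1 hKn)

lemma formula_iff (stones : List Int) (K : Nat) (hK1 : 1 ≤ K) (hKn : K ≤ stones.length) :
    (∀ i < stones.length + 1 - K, lmax stones ∈ (stones.drop i).take K)
      ↔ ansSpec stones K = lmax stones := by
  constructor
  · intro h
    refine le_antisymm (ans_le_M stones K hK1 hKn) ?_
    rw [ansSpec]
    apply le_lmin _ _ (ansList_ne_nil stones K hKn)
    intro x hx
    obtain ⟨i, hi, rfl⟩ := List.mem_map.1 hx
    exact le_lmax _ _ (h i (List.mem_range.1 hi))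
  · intro h i hi
    have hik : i + K ≤ stones.length := by omega
    have hup : wmax stones K i ≤ lmax stones := by
      rw [wmax]
      apply (lmax_le_iff _ _ (window_ne_nil stones K i hK1 hik)).2
      intro x hx
      exact le_lmax stones x (List.mem_of_mem_drop (List.mem_of_mem_take hx))
    have hdn : lmax stones ≤ wmax stones K i := by
      have h1 : lmin ((List.range (stones.length + 1 - K)).map (wmax stones K)) ≤ wmax stones K i :=
        lmin_le _ _ (List.mem_map.2 ⟨i, List.mem_range.2 hi, rfl⟩)
      rw [← ansSpec, h] at h1
      exact h1
    have heq : wmax stones K i = lmax stones := le_antisymm hup hdn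
    rw [← heq]
    exact lmax_mem _ (window_ne_nil stones K i hK1 hik)

-- ---- closed form for badd ----
lemma pow2_big (j : Nat) : j = 0 ∨ j = 1 ∨ 4 ≤ 2 ^ j := by
  match j with
  | 0 => exact Or.inl rfl
  | 1 => exact Or.inr (Or.inl rfl)
  | j + 2 =>
    right; right
    calc (4 : Nat) = 2 ^ 2 := rfl
    _ ≤ 2 ^ (j + 2) := Nat.pow_le_pow_right (by norm_num) (by omega)

lemma badd_iff : ∀ y : Nat, y < 2 ^ 38 →
    (badd y = true ↔ ∃ j : Nat, j < 40 ∧ 2 ^ j ≤ y + 2 ∧ 2 * (y + 2) < 3 * 2 ^ j) := by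
  intro y
  induction y using Nat.strong_induction_on with
  | _ y ih =>
    intro hy
    match y with
    | 0 =>
      have hb : badd 0 = true := by simp [badd]
      rw [hb]
      constructor
      · intro _; exact ⟨1, by norm_num⟩
      · intro _; rfl
    | 1 =>
      have hb : badd 1 = false := by simp [badd]
      rw [hb]
      constructor
      · intro h; exact absurd h (by simp)
      · rintro ⟨j, hj, h1, h2⟩
        rcases pow2_big j with rfl | rfl | h4
        · norm_num at h2
        · norm_num at h2
        · omega
    | x + 2 =>
      rw [badd]
      have hlt : (x + 2) / 2 - 1 < x + 2 := by omega
      rw [ih _ hlt (by omega)]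
      have hq : (x + 2) / 2 - 1 + 2 = (x + 4) / 2 := by omega
      rw [hq]
      constructor
      · rintro ⟨j, hj, h1, h2⟩
        have hj1 : 1 ≤ j := by
          rcases pow2_big j with rfl | rfl | h4
          · simp at h1 h2; omega
          · exact le_refl 1
          · by_contra h; interval_cases j; simp_all
        refine ⟨j + 1, ?_, ?_, ?_⟩
        · -- j + 1 < 40: from 2^j ≤ (x+4)/2 and x+2 < 2^38
          by_contra hbig
          have h39 : 39 ≤ j := by omega
          have : 2 ^ 39 ≤ 2 ^ j := Nat.pow_le_pow_right (by norm_num) h39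
          have hb : (2 : Nat) ^ 39 ≤ (x + 4) / 2 := le_trans this h1
          have : (2 : Nat) ^ 38 < 2 ^ 39 := by norm_num
          omega
        · have : 2 ^ (j + 1) = 2 * 2 ^ j := by rw [Nat.pow_succ]; ring
          omega
        · obtain ⟨jj, rfl⟩ := Nat.exists_eq_add_of_le' hj1
          have e1 : 2 ^ (jj + 1) = 2 * 2 ^ jj := by rw [Nat.pow_succ]; ring
          have e2 : 2 ^ (jj + 1 + 1) = 4 * 2 ^ jj := by rw [Nat.pow_succ, Nat.pow_succ]; ring
          omega
      · rintro ⟨j, hj, h1, h2⟩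
        have hj1 : 2 ≤ j := by
          rcases pow2_big j with rfl | rfl | h4
          · simp at h1 h2; omega
          · simp at h1 h2; omega
          · rcases Nat.lt_or_ge j 2 with h | h
            · interval_cases j <;> simp_all
            · exact h
        refine ⟨j - 1, by omega, ?_, ?_⟩
        · obtain ⟨jj, rfl⟩ := Nat.exists_eq_add_of_le' hj1
          have e1 : 2 ^ (jj + 2) = 2 * 2 ^ (jj + 1) := by rw [Nat.pow_succ]; ring
          have e3 : jj + 2 - 1 = jj + 1 := by omega
          rw [e3]
          omega
        · obtain ⟨jj, rfl⟩ := Nat.exists_eq_add_of_le' hj1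
          have e1 : 2 ^ (jj + 2) = 4 * 2 ^ jj := by rw [Nat.pow_succ, Nat.pow_succ]; ring
          have e2 : jj + 2 - 1 = jj + 1 := by omega
          have e4 : 2 ^ (jj + 1) = 2 * 2 ^ jj := by rw [Nat.pow_succ]; ring
          rw [e2, e4]
          omega

lemma badcond_iff (d : Int) (h2 : 2 ≤ d) (hb : d < 2 ^ 38 - 2) :
    (2 * (d + 2).toNat < 3 * 2 ^ (d + 2).toNat.log2) ↔ badd d.toNat = true := by
  have h38i : (2 : Int) ^ 38 = 274877906944 := by norm_num
  have h38n : (2 : Nat) ^ 38 = 274877906944 := by norm_num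
  rw [badd_iff d.toNat (by omega)]
  have hq2 : d.toNat + 2 = (d + 2).toNat := by omega
  rw [hq2]
  set q := (d + 2).toNat with hq
  have hq4 : 4 ≤ q := by omega
  constructor
  · intro h
    refine ⟨q.log2, ?_, Nat.log2_self_le (by omega), h⟩
    by_contra hbig
    have h40 : 40 ≤ q.log2 := by omega
    have hp : (2 : Nat) ^ 40 ≤ 2 ^ q.log2 := Nat.pow_le_pow_right (by norm_num) h40
    have hs := Nat.log2_self_le (show q ≠ 0 by omega)
    have h40n : (2 : Nat) ^ 40 = 1099511627776 := by norm_num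
    omega
  · rintro ⟨j, hj, h1, h2'⟩
    have hjle : j ≤ q.log2 := (Nat.le_log2 (by omega)).2 h1
    have hp : (2 : Nat) ^ j ≤ 2 ^ q.log2 := Nat.pow_le_pow_right (by norm_num) hjle
    omega

-- ---- A's value when the answer equals the maximum ----
lemma A_d0 (stones : List Int) (k : Int) (K : Nat) (hk : k = (K : Int))
    (hK1 : 1 ≤ K) (hKn : K ≤ stones.length)
    (hA : ansSpec stones K = lmax stones) (hd : lmax stones = lmin stones) :
    solution stones k = lmax stones := by
  have hne : stones ≠ [] := by intro h; rw [h] at hKn; simp at hKn; omega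
  rw [solution_eq_loop stones k hne]
  set M := lmax stones with hM
  rw [← hd]
  have hfuel : (M - M).toNat + 4 = 4 := by omega
  rw [hfuel]
  rw [pvLoopA, if_neg (by omega)]
  rw [PySem.Int.floordiv_eq_ediv_of_pos (by norm_num)]
  have hmi : (M + M + 1) / 2 = M := by omega
  rw [hmi, runScan_ans stones k K hk hK1 hKn, hA,
    decide_eq_false (by omega : ¬ M ≤ M - 1), if_neg (by simp)]
  rw [pvLoopA, if_neg (by omega)]
  rw [PySem.Int.floordiv_eq_ediv_of_pos (by norm_num)]
  have hmi2 : (M + 1 + M + 1) / 2 = M + 1 := by omega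
  rw [hmi2, runScan_ans stones k K hk hK1 hKn, hA,
    decide_eq_true (by omega : M ≤ M + 1 - 1), if_pos rfl]
  rw [pvLoopA, if_pos (by omega)]

lemma A_d1 (stones : List Int) (k : Int) (hne : stones ≠ [])
    (hd : lmax stones - lmin stones = 1) :
    solution stones k = lmax stones - 1 := by
  rw [solution_eq_loop stones k hne, pvLoopA, if_pos (by omega)]
  omega

lemma A_dge2 (stones : List Int) (k : Int) (K : Nat) (hk : k = (K : Int))
    (hK1 : 1 ≤ K) (hKn : K ≤ stones.length)
    (hA : ansSpec stones K = lmax stones) (hd : 2 ≤ lmax stones - lmin stones) :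
    solution stones k =
      (if badd (lmax stones - lmin stones).toNat then lmax stones - 1 else lmax stones) := by
  have hne : stones ≠ [] := by intro h; rw [h] at hKn; simp at hKn; omega
  rw [solution_eq_loop stones k hne]
  set M := lmax stones with hM
  set m0 := lmin stones with hm0
  set d : Int := M - m0 with hdd
  rw [pvLoopA, if_neg (by omega)]
  rw [PySem.Int.floordiv_eq_ediv_of_pos (by norm_num)]
  set mi : Int := (m0 + M + 1) / 2 with hmi
  have hmiB : m0 + 1 ≤ mi ∧ mi + 1 ≤ M := by omega
  rw [runScan_ans stones k K hk hK1 hKn, hA,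
    decide_eq_false (by omega : ¬ M ≤ mi - 1), if_neg (by simp)]
  have hrec := ML2 stones k K hk hK1 hKn (ansSpec stones K) M rfl hA
    (d.toNat + 3) (mi + 1) (by omega) (by omega)
  rw [show mi + 1 - 1 = mi from by ring] at hrec
  rw [hrec]
  have hcond : ((mi + 1 ≤ M ∧ badd (M - (mi + 1)).toNat = true) ↔ badd d.toNat = true) := by
    have hx2 : 2 ≤ d.toNat := by omega
    have hrel : (M - (mi + 1)).toNat = d.toNat / 2 - 1 := by omega
    rw [hrel, ← badd_two _ hx2]
    exact ⟨fun h => h.2, fun h => ⟨hmiB.2, h⟩⟩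
  by_cases hb : badd d.toNat = true
  · rw [if_pos (hcond.2 hb), if_pos hb]
  · rw [if_neg (fun hc => hb (hcond.1 hc)), if_neg hb]

-- D_solution with its let expanded, and max/min identified with lmax/lmin
lemma D_unfold (stones : List Int) (k : Int) (hne : stones ≠ []) :
    D_solution stones k ↔
      ((∀ i < stones.length + 1 - k.toNat,
          lmax stones ∈ (stones.drop i).take k.toNat) ∧
        (lmax stones - lmin stones = 1 ∨
          2 ≤ lmax stones - lmin stones ∧
            2 * (lmax stones - lmin stones + 2).toNat <
              3 * 2 ^ (lmax stones - lmin stones + 2).toNat.log2)) := by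
  cases stones with
  | nil => exact absurd rfl hne
  | cons h t => exact Iff.rfl

lemma dom_bound (stones : List Int) (k : Int) (hDom : Dom_solution stones k) :
    ∀ x ∈ stones, -2147483648 ≤ x ∧ x ≤ 2147483648 := by
  intro x hx
  unfold Dom_solution at hDom
  rw [Bool.and_eq_true, List.all_eq_true] at hDom
  have := hDom.1 x hx
  simpa [pvDomInt] using this

-- ---- the k ≤ 0 region: A's scan fires at once, the bisection walks down to min(stones) ----
lemma runScan_true_nonpos (k m s0 : Int) (rest : List Int) (hk : k ≤ 0) :
    pvRunScan k m (s0 :: rest) 0 = true := by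
  show (if (if s0 - m ≤ 0 then (0:Int) + 1 else 0) ≥ k then true
        else pvRunScan k m rest (if s0 - m ≤ 0 then (0:Int) + 1 else 0)) = true
  rw [if_pos (by split <;> omega)]

lemma ML5 (s0 : Int) (rest : List Int) (k m0 : Int) (hk : k ≤ 0) :
    ∀ (fuel : Nat) (lu : Int), m0 + 1 ≤ lu → (lu - m0).toNat + 1 ≤ fuel →
      pvLoopA (s0 :: rest) k fuel m0 lu m0 (lu - 1)
        (PySem.Int.floordiv (m0 + (lu - 1) + 1) 2) = m0 := by
  intro fuel
  induction fuel with
  | zero => intro lu _ hf; exact absurd hf (by omega)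
  | succ f ih =>
    intro lu h1 hf
    rw [pvLoopA]
    by_cases hexit : lu - m0 = 1
    · rw [if_pos hexit]
    · rw [if_neg hexit]
      rw [runScan_true_nonpos k _ s0 rest hk, if_pos rfl]
      have hdiv : PySem.Int.floordiv (m0 + (lu - 1) + 1) 2 = (m0 + lu) / 2 := by
        rw [PySem.Int.floordiv_eq_ediv_of_pos (by norm_num)]; ring_nf
      have hmi1 : m0 + 1 ≤ PySem.Int.floordiv (m0 + (lu - 1) + 1) 2 := by rw [hdiv]; omega
      have hmif : (PySem.Int.floordiv (m0 + (lu - 1) + 1) 2 - m0).toNat + 1 ≤ f := by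
        rw [hdiv]; omega
      exact ih _ hmi1 hmif

lemma maxD_lmax (stones : List Int) (hne : stones ≠ []) :
    stones.max?.getD 0 = lmax stones := by
  cases stones with
  | nil => exact absurd rfl hne
  | cons h t => rfl

lemma minD_lmin (stones : List Int) (hne : stones ≠ []) :
    stones.min?.getD 0 = lmin stones := by
  cases stones with
  | nil => exact absurd rfl hne
  | cons h t => rfl

lemma A_ksmall (stones : List Int) (k : Int) (hne : stones ≠ []) (hk : k ≤ 0)
    (hd : lmin stones < lmax stones) :
    solution stones k = lmin stones := by
  obtain ⟨s0, rest, rfl⟩ := List.exists_cons_of_ne_nil hne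
  rw [solution_eq_loop _ k hne]
  rw [show (lmax (s0 :: rest) - lmin (s0 :: rest)).toNat + 4
      = ((lmax (s0 :: rest) - lmin (s0 :: rest)).toNat + 3) + 1 from by omega]
  rw [pvLoopA]
  by_cases hexit : lmax (s0 :: rest) - lmin (s0 :: rest) = 1
  · rw [if_pos hexit]
  · rw [if_neg hexit]
    rw [runScan_true_nonpos k _ s0 rest hk, if_pos rfl]
    have hmid : PySem.Int.floordiv (lmin (s0 :: rest) + lmax (s0 :: rest) + 1) 2
        = (lmin (s0 :: rest) + lmax (s0 :: rest) + 1) / 2 :=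
      PySem.Int.floordiv_eq_ediv_of_pos (by norm_num)
    exact ML5 s0 rest k _ hk _ _ (by rw [hmid]; omega) (by rw [hmid]; omega)

lemma getD_map_range_self (stones : List Int) :
    (List.range stones.length).map (fun (i : Nat) => PySem.List.pyGetD stones (i : Int) 0)
      = stones := by
  apply List.ext_getElem
  · simp
  · intro j hj1 hj2
    simp only [List.getElem_map, List.getElem_range]
    rw [PySem.List.pyGetD_natCast, List.getD_eq_getElem?_getD]
    have hj : j < stones.length := by simpa using hj2
    rw [List.getElem?_eq_getElem hj]
    rfl

lemma alt_ksmall (stones : List Int) (k : Int) (hne : stones ≠ []) (hk : k ≤ 0) :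
    solution_alt stones k = lmin stones := by
  unfold solution_alt
  rw [min_eq_left (by omega : (stones.length : Int) ≤ (stones.length : Int) - k + 1)]
  rw [PySem.List.pyRange_zero_nat, List.foldl_map]
  show ((List.range stones.length).foldl
      (fun (o : Option Int) (i : Nat) =>
        match o with
        | none => some (pvInner stones k (i : Int))
        | some b => if pvInner stones k (i : Int) < b then some (pvInner stones k (i : Int))
                    else some b) none).getD 0 = lmin stones
  rw [optfold_factor (fun i : Nat => pvInner stones k (i : Int))]
  have hcon : ∀ i ∈ List.range stones.length,
      pvInner stones k (i : Int) = PySem.List.pyGetD stones (i : Int) 0 := by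
    intro i hi
    unfold pvInner
    rw [PySem.List.pyRange_one_eq_nil (by omega : (i : Int) + k ≤ (i : Int) + 1)]
    rfl
  rw [List.map_congr_left hcon, getD_map_range_self]
  cases stones with
  | nil => exact absurd rfl hne
  | cons v vs => rw [optfold_min_none]; rfl

lemma D_false_nonpos (stones : List Int) (k : Int) (hne : stones ≠ []) (hk : k ≤ 0) :
    ¬ D_solution stones k := by
  intro hD
  have hk0 : k.toNat = 0 := by omega
  have h := ((D_unfold stones k hne).1 hD).1 0 (by omega)
  rw [hk0] at h
  simp at h

-- ===== VERDICT (by name: the statement is the Claim_ definition above) =====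
theorem solution_spec : Claim_unchanged_solution := by
  intro stones k hDom hPre hnD
  obtain ⟨hne, hkn, harm⟩ := hPre
  by_cases hk1 : 1 ≤ k
  · have hk : k = (k.toNat : Int) := by omega
    set K := k.toNat with hKdef
    have hK1 : 1 ≤ K := by omega
    have hKn : K ≤ stones.length := by omega
    rw [alt_eq_ansSpec stones k K hk hK1 hKn]
    have hle := ans_le_M stones K hK1 hKn
    rcases lt_or_eq_of_le hle with hlt | heq
    · -- the answer is below the maximum: A's bisection is sound, ML1 applies
      rw [solution_eq_loop stones k hne]
      exact ML1 stones k K hk hK1 hKn _ rfl _ (lmin stones) (lmax stones) (lmin stones)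
        (lmax stones) (m0_le_ans stones K hK1 hKn)
        (by have := m0_le_ans stones K hK1 hKn; omega) hle
        (Or.inr rfl) (Or.inr ⟨rfl, hlt⟩) (by omega)
    · -- the answer equals the maximum
      have hform := (formula_iff stones K hK1 hKn).2 heq
      have hd0 : 0 ≤ lmax stones - lmin stones := by
        have := lmin_le stones _ (lmax_mem stones hne); omega
      have hnbad := fun hbad => hnD ((D_unfold stones k hne).2 ⟨by rw [← hKdef]; exact hform, hbad⟩)
      set d : Int := lmax stones - lmin stones with hdd
      rcases lt_trichotomy d 1 with h | h | h
      · have hdz : lmax stones = lmin stones := by omega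
        rw [A_d0 stones k K hk hK1 hKn heq hdz, heq]
      · exact absurd (Or.inl h) hnbad
      · have hbound := dom_bound stones k hDom
        have hMb := hbound _ (lmax_mem stones hne)
        have hmb := hbound _ (lmin_mem stones hne)
        have hdlt : d < 2 ^ 38 - 2 := by
          have : (2 : Int) ^ 38 = 274877906944 := by norm_num
          omega
        rw [A_dge2 stones k K hk hK1 hKn heq (by omega)]
        rw [if_neg, heq]
        intro hb
        exact hnbad (Or.inr ⟨by omega, (badcond_iff d (by omega) hdlt).2 hb⟩)
  · -- k ≤ 0: A walks down to min(stones); B's windows degenerate to single stones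
    have hdneq : stones.max?.getD 0 ≠ stones.min?.getD 0 := by
      rcases harm with h | h
      · omega
      · exact h
    rw [maxD_lmax stones hne, minD_lmin stones hne] at hdneq
    have hlt : lmin stones < lmax stones := by
      have := lmin_le stones _ (lmax_mem stones hne); omega
    rw [A_ksmall stones k hne (by omega) hlt, alt_ksmall stones k hne (by omega)]

theorem solution_changed : Claim_changed_solution := by unfold Claim_changed_solution; decide

theorem solution_tight : Claim_exact_solution := by
  intro stones k hDom hPre hD
  obtain ⟨hne, hkn, harm⟩ := hPre
  by_cases hk1 : 1 ≤ k
  · have hk : k = (k.toNat : Int) := by omega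
    set K := k.toNat with hKdef
    have hK1 : 1 ≤ K := by omega
    have hKn : K ≤ stones.length := by omega
    rw [alt_eq_ansSpec stones k K hk hK1 hKn]
    obtain ⟨hform, hbad⟩ := (D_unfold stones k hne).1 hD
    have heq : ansSpec stones K = lmax stones :=
      (formula_iff stones K hK1 hKn).1 (by rw [hKdef]; exact hform)
    rw [heq]
    rcases hbad with h1 | ⟨h2, hex⟩
    · rw [A_d1 stones k hne h1]; omega
    · have hbound := dom_bound stones k hDom
      have hMb := hbound _ (lmax_mem stones hne)
      have hmb := hbound _ (lmin_mem stones hne)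
      have hdlt : lmax stones - lmin stones < 2 ^ 38 - 2 := by
        have : (2 : Int) ^ 38 = 274877906944 := by norm_num
        omega
      have hbt := (badcond_iff _ h2 hdlt).1 hex
      rw [A_dge2 stones k K hk hK1 hKn heq h2, if_pos hbt]
      omega
  · exact absurd hD (D_false_nonpos stones k hne (by omega))
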